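-- pv_equiv track=rewrite | github.com/jacazjx/sibyl-research-system | sibyl/orchestration/migration_cli.py | strip_leading_title
-- ===== SOURCE A (Python) =====
-- def strip_leading_title(markdown: str) -> str:
--     lines = markdown.splitlines()
--     while lines and not lines[0].strip():
--         lines.pop(0)
--     if lines and lines[0].lstrip().startswith("#"):
--         lines.pop(0)
--         while lines and not lines[0].strip():
--             lines.pop(0)
--     return "\n".join(lines).strip()
-- ===== SOURCE B (Python) =====
-- def strip_leading_title(markdown: str) -> str:
--     lines = markdown.splitlines()
--     i = 0
--     while i < len(lines) and not lines[i].strip():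
--         i += 1
--     if i < len(lines) and lines[i].lstrip().startswith("#"):
--         i += 1
--     return "\n".join(lines[i:]).strip()
-- ===== Notes on version B (the rewrite author's own statement) =====
-- stated objective: simpler
-- what changed: Replaces the two nested pop(0)-mutation loops (re-stripping blanks after the title) with a single forward index scan and one slice-join; the second blank-stripping loop disappears because the final .strip() already removes that whitespace.
import Mathlib
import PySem

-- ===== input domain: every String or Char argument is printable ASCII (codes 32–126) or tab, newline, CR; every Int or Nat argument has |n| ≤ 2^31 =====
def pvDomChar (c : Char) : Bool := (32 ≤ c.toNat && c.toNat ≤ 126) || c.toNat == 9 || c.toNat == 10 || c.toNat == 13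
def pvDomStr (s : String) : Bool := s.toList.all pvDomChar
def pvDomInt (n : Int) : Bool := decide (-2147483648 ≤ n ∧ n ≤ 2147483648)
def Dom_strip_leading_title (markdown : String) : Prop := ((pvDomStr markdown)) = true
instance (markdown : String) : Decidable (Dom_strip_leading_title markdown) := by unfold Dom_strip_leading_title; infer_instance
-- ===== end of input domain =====

-- B replaces A's two pop(0)-mutation loops by one index scan plus a slice-join,
-- dropping the redundant second blank-stripping loop (objective: simpler).

-- ===== PORT A =====
-- A's `while lines and not lines[0].strip(): lines.pop(0)` loop (used twice in A)
def stripBlanksA : List String → List String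
  | [] => []
  | l :: rest => if PySem.Str.len (PySem.Str.strip l) == 0 then stripBlanksA rest else l :: rest

def strip_leading_title (markdown : String) : String :=
  let lines := PySem.Str.splitlines markdown
  let lines := stripBlanksA lines
  let lines :=
    match lines with
    | [] => ([] : List String)
    | l :: rest =>
      if PySem.Str.startswith (PySem.Str.lstrip l) "#" then stripBlanksA rest
      else l :: rest
  PySem.Str.strip (PySem.Str.join "\n" lines)

-- ===== PORT B =====
-- Source B's `while i < len(lines) and not lines[i].strip(): i += 1`
def scanBlankB (lines : List String) (i : Nat) : Nat :=
  if h : i < lines.length then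
    if PySem.Str.len (PySem.Str.strip lines[i]) == 0 then scanBlankB lines (i + 1) else i
  else i
termination_by lines.length - i

def strip_leading_title_alt (markdown : String) : String :=
  let lines := PySem.Str.splitlines markdown
  let i := scanBlankB lines 0
  let i :=
    if h : i < lines.length then
      if PySem.Str.startswith (PySem.Str.lstrip lines[i]) "#" then i + 1 else i
    else i
  PySem.Str.strip (PySem.Str.join "\n" (lines.drop i))

-- ===== PRECONDITION & SPEC =====
def Spec_strip_leading_title (markdown : String) (out : String) : Prop := out = strip_leading_title_alt markdown
instance (markdown : String) (out : String) : Decidable (Spec_strip_leading_title markdown out) := by unfold Spec_strip_leading_title; infer_instance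

-- ===== CLAIM (what is proved, stated in full; the proofs are below) =====
def Claim_equal_strip_leading_title : Prop := ∀ (markdown : String), Dom_strip_leading_title markdown → Spec_strip_leading_title markdown (strip_leading_title markdown)

-- ===== LEMMAS AND PROOFS =====

-- a blank line (strip l == "") is all-whitespace
theorem blank_all_space {l : String} (h : (PySem.Str.len (PySem.Str.strip l) == 0) = true) :
    ∀ c ∈ l.toList, PySem.Chars.isspace c = true := by
  have hs : PySem.Chars.strip l.toList = [] := by
    simpa [PySem.Str.len, PySem.Str.strip] using h
  have hr : ∀ c ∈ PySem.Chars.lstrip l.toList, PySem.Chars.isspace c = true := by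
    intro c hc
    have : (List.dropWhile PySem.Chars.isspace (PySem.Chars.lstrip l.toList).reverse) = [] := by
      simpa [PySem.Chars.strip, PySem.Chars.rstrip] using hs
    have := (List.dropWhile_eq_nil_iff).mp this
    exact this c (List.mem_reverse.mpr hc)
  intro c hc
  rw [← List.takeWhile_append_dropWhile (p := PySem.Chars.isspace) (l := l.toList)] at hc
  rcases List.mem_append.mp hc with h1 | h1
  · exact List.mem_takeWhile_imp h1
  · exact hr c h1

-- dropping an all-whitespace first line does not change "\n".join(...).strip()
theorem strip_join_cons_blank (lc : List Char) (ts : List (List Char))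
    (h : ∀ c ∈ lc, PySem.Chars.isspace c = true) :
    PySem.Chars.strip (PySem.Chars.join ['\n'] (lc :: ts)) =
      PySem.Chars.strip (PySem.Chars.join ['\n'] ts) := by
  have hdrop : List.dropWhile PySem.Chars.isspace lc = [] := List.dropWhile_eq_nil_iff.mpr h
  cases ts with
  | nil =>
      simp [PySem.Chars.join_nil, PySem.Chars.join_singleton, PySem.Chars.strip,
        PySem.Chars.lstrip, PySem.Chars.rstrip, hdrop]
  | cons t ts' =>
      rw [PySem.Chars.join_cons_cons]
      simp [PySem.Chars.strip, PySem.Chars.lstrip, List.dropWhile_append, hdrop,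
        List.dropWhile_cons]
      simp [PySem.Chars.isspace]

-- Str-level corollary for a blank first line
theorem str_strip_join_cons_blank (l : String) (rest : List String)
    (h : (PySem.Str.len (PySem.Str.strip l) == 0) = true) :
    PySem.Str.strip (PySem.Str.join "\n" (l :: rest)) =
      PySem.Str.strip (PySem.Str.join "\n" rest) := by
  have hsp := blank_all_space h
  simp only [PySem.Str.strip, PySem.Str.join, List.map_cons]
  have : ("\n" : String).toList = ['\n'] := by decide
  rw [this, PySem.Chars.strip, PySem.Chars.strip, String.toList_ofList, String.toList_ofList,
    ← PySem.Chars.strip, ← PySem.Chars.strip, strip_join_cons_blank _ _ hsp]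

-- A's second blank-stripping loop is absorbed by the final strip
theorem strip_join_stripBlanksA (rest : List String) :
    PySem.Str.strip (PySem.Str.join "\n" (stripBlanksA rest)) =
      PySem.Str.strip (PySem.Str.join "\n" rest) := by
  induction rest with
  | nil => rfl
  | cons l rs ih =>
      by_cases hb : (PySem.Str.len (PySem.Str.strip l) == 0) = true
      · rw [stripBlanksA, if_pos hb, ih, str_strip_join_cons_blank l rs hb]
      · rw [stripBlanksA, if_neg hb]

-- B's index scan computes A's first pop-loop, as a drop
theorem drop_scanBlankB (lines : List String) (i : Nat) :
    lines.drop (scanBlankB lines i) = stripBlanksA (lines.drop i) := by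
  fun_induction scanBlankB lines i with
  | case1 i h hb ih =>
      rw [ih, List.drop_eq_getElem_cons h, stripBlanksA, if_pos hb]
  | case2 i h hb =>
      rw [List.drop_eq_getElem_cons h, stripBlanksA, if_neg hb]
  | case3 i h =>
      rw [List.drop_eq_nil_of_le (by omega)]
      rfl

-- ===== VERDICT (by name: the statement is the Claim_ definition above) =====
theorem strip_leading_title_spec : Claim_equal_strip_leading_title := by
  intro markdown _
  unfold Spec_strip_leading_title strip_leading_title strip_leading_title_alt
  dsimp only
  set ls := PySem.Str.splitlines markdown with hls
  have hd := drop_scanBlankB ls 0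
  rw [List.drop_zero] at hd
  set j := scanBlankB ls 0 with hj
  cases hcase : stripBlanksA ls with
  | nil =>
      rw [hcase] at hd
      have hlen : ls.length ≤ j := List.drop_eq_nil_iff.mp hd
      dsimp only
      rw [dif_neg (by omega), hd]
  | cons l rest =>
      rw [hcase] at hd
      have hjlt : j < ls.length := by
        by_contra hge
        rw [List.drop_eq_nil_of_le (by omega)] at hd
        simp at hd
      have hget : ls[j] = l := by
        have h1 : ls[j]? = (ls.drop j).head? := (List.head?_drop).symm
        rw [hd] at h1
        simpa [List.getElem?_eq_getElem hjlt] using h1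
      dsimp only
      rw [dif_pos hjlt, hget]
      by_cases hst : PySem.Str.startswith (PySem.Str.lstrip l) "#" = true
      · rw [if_pos hst, if_pos hst]
        have hrest : ls.drop (j + 1) = rest := by
          have h2 := congrArg (List.drop 1) hd
          rw [List.drop_drop] at h2
          simpa [Nat.add_comm] using h2
        rw [hrest, strip_join_stripBlanksA]
      · rw [if_neg hst, if_neg hst, hd]
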